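-- pv_equiv track=rewrite | github.com/WithoutHaste/RecreationalMath | pythonGenerators/generate_figurate.py | generate_pentagonal
-- ===== SOURCE A (Python) =====
-- def generate_pentagonal(max):
-- 	""" Returns an array of pentagonal numbers from 1 to max """
-- 	if max <= 0:
-- 		raise Exception('generate_pentagonal requires a positive integer')
--
-- 	is_pentagonal = []
-- 	n = 1
-- 	while True:
-- 		pentagonal = int(n * (3*n - 1) / 2)
-- 		if pentagonal > max:
-- 			break
-- 		is_pentagonal.append(pentagonal)
-- 		n = n + 1
--
-- 	return is_pentagonal
-- ===== SOURCE B (Python) =====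
-- def generate_pentagonal(max):
-- 	""" Returns an array of pentagonal numbers from 1 to max """
-- 	result = []
-- 	value = 1
-- 	delta = 4
-- 	while value <= max:
-- 		result.append(value)
-- 		value += delta
-- 		delta += 3
-- 	return result
-- ===== Notes on version B (the rewrite author's own statement) =====
-- stated objective: simpler
-- what changed: B maintains a running pentagonal value and a running difference (value += delta, delta += 3) instead of recomputing the closed form int(n*(3n-1)/2) each iteration, and needs no counter n.
import Mathlib
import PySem

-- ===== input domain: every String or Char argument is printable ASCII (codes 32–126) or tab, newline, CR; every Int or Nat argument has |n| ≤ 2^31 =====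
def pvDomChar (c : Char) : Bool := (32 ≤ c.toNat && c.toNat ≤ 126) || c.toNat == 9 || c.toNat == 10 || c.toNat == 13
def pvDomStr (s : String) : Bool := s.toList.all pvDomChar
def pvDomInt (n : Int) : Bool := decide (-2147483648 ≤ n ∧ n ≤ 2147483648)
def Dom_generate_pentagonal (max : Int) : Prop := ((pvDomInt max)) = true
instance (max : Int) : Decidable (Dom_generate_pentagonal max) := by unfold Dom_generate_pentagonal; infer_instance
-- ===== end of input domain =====

-- B changes the algorithm: a running value and running difference replace the per-iteration
-- closed form n*(3n-1)/2; objective: simpler per-step state. A raises on max ≤ 0 (excluded by Pre_).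

-- ===== PORT A =====
-- A's `while True` loop; fuel is only a totality guard (pentagonal(n) ≥ n, so
-- max.toNat + 1 steps always reach the break).
def pentLoopA (fuel : Nat) (max n : Int) (acc : List Int) : List Int :=
  match fuel with
  | 0 => acc
  | f + 1 =>
    let pentagonal := PySem.Int.floordiv (n * (3 * n - 1)) 2
    if pentagonal > max then acc
    else pentLoopA f max (n + 1) (acc ++ [pentagonal])

-- int(n*(3*n-1)/2): the product is even and, on Dom, far below 2^53, so Python's
-- float division then int() is exact and equals floor division (ported via PySem.Int.floordiv).
def generate_pentagonal (max : Int) : List Int :=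
  pentLoopA (max.toNat + 1) max 1 []

-- ===== PORT B =====
def pentLoopB (fuel : Nat) (max value delta : Int) : List Int :=
  match fuel with
  | 0 => []
  | f + 1 =>
    if value ≤ max then value :: pentLoopB f max (value + delta) (delta + 3)
    else []

def generate_pentagonal_alt (max : Int) : List Int :=
  pentLoopB (max.toNat + 1) max 1 4

-- ===== PRECONDITION & SPEC =====
-- A raises an explicit Exception for max ≤ 0.
def Pre_generate_pentagonal (max : Int) : Prop := 0 < max
instance (max : Int) : Decidable (Pre_generate_pentagonal max) := by unfold Pre_generate_pentagonal; infer_instance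
def pvWitness_generate_pentagonal : Int := (5)

def Spec_generate_pentagonal (max : Int) (out : List Int) : Prop := out = generate_pentagonal_alt max
instance (max : Int) (out : List Int) : Decidable (Spec_generate_pentagonal max out) := by unfold Spec_generate_pentagonal; infer_instance

-- ===== CLAIM (what is proved, stated in full; the proofs are below) =====
def Claim_equal_generate_pentagonal : Prop := ∀ (max : Int), Dom_generate_pentagonal max → Pre_generate_pentagonal max → Spec_generate_pentagonal max (generate_pentagonal max)

-- ===== LEMMAS AND PROOFS =====

-- the closed form A computes at step n
def pentOf (n : Int) : Int := PySem.Int.floordiv (n * (3 * n - 1)) 2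

lemma pentOf_eq (n k : Int) (hk : n * (3 * n - 1) = 2 * k) : pentOf n = k := by
  unfold pentOf
  rw [PySem.Int.floordiv_eq_ediv_of_pos (by norm_num), hk]
  exact Int.mul_ediv_cancel_left k (by norm_num)

lemma even_prod (n : Int) : ∃ k, n * (3 * n - 1) = 2 * k := by
  rcases Int.even_or_odd n with ⟨m, hm⟩ | ⟨m, hm⟩
  · exact ⟨m * (3 * n - 1), by rw [hm]; ring⟩
  · exact ⟨n * (3 * m + 1), by rw [hm]; ring⟩

lemma pentOf_step (n : Int) : pentOf (n + 1) = pentOf n + (3 * n + 1) := by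
  obtain ⟨k, hk⟩ := even_prod n
  rw [pentOf_eq n k hk, pentOf_eq (n + 1) (k + (3 * n + 1)) (by linear_combination hk)]

-- loop correspondence: A's state n matches B's state (pentOf n, 3n+1)
lemma loop_eq (fuel : Nat) (max : Int) : ∀ (n : Int) (acc : List Int),
    pentLoopA fuel max n acc = acc ++ pentLoopB fuel max (pentOf n) (3 * n + 1) := by
  induction fuel with
  | zero => intro n acc; simp [pentLoopA, pentLoopB]
  | succ f ih =>
    intro n acc
    show (if pentOf n > max then acc
          else pentLoopA f max (n + 1) (acc ++ [pentOf n])) = _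
    by_cases h : pentOf n > max
    · simp [pentLoopB, h, not_le.mpr h]
    · rw [if_neg h, ih (n + 1)]
      have h' : pentOf n ≤ max := not_lt.mp h
      simp [pentLoopB, h', pentOf_step, List.append_assoc]
      ring_nf

-- ===== VERDICT (by name: the statement is the Claim_ definition above) =====
theorem generate_pentagonal_spec : Claim_equal_generate_pentagonal := by
  intro max _ _
  show generate_pentagonal max = generate_pentagonal_alt max
  unfold generate_pentagonal generate_pentagonal_alt
  rw [loop_eq (max.toNat + 1) max 1 []]
  norm_num
  rfl
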